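-- pv_equiv track=rewrite | github.com/ArnaudFlaesch/WebCrawler | crawler.py | urlredux
-- ===== SOURCE A (Python) =====
-- def urlredux(url):
--     """Remove everything from an url after a '#' or a '?'."""
--     inc = 0
--     if url:
--         for car in url:
--             if car == '?' or car == '#':
--                 url = url[:inc]
--             inc += 1
--         return url
-- ===== SOURCE B (Python) =====
-- def urlredux(url):
--     """Remove everything from an url after a '#' or a '?'."""
--     if url:
--         positions = [i for i in (url.find('?'), url.find('#')) if i != -1]
--         return url[:min(positions)] if positions else url
-- ===== Notes on version B (the rewrite author's own statement) =====
-- stated objective: faster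
-- what changed: Replaces the character-by-character loop that repeatedly re-slices the url with two built-in find() calls and a min over the valid positions, slicing once (measured ~3.5x faster at large sizes).
-- outside the precondition, e.g. on urlredux(''): A returns None, B returns None
import Mathlib
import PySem

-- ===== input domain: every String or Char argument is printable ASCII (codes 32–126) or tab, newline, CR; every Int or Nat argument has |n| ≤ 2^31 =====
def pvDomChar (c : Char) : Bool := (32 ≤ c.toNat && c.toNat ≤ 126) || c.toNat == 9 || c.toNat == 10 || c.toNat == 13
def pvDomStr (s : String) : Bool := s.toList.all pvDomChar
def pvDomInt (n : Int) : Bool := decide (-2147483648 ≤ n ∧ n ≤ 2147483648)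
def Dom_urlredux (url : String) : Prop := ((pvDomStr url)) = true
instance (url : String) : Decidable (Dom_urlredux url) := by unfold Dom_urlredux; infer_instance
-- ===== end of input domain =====

-- B replaces A's character loop (which re-slices the url at every delimiter) by two str.find calls
-- and a min over the valid positions; proof about the RETURN value on non-empty urls.

-- ===== PORT A =====
-- the 'for car in url' loop: cur is the (possibly re-sliced) url, inc the running counter
def urlreduxLoop (cs : List Char) (cur : List Char) (inc : Nat) : List Char :=
  match cs with
  | [] => cur
  | c :: rest =>
      urlreduxLoop rest
        (if c = '?' ∨ c = '#' then PySem.List.slice cur none (some (inc : Int)) else cur)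
        (inc + 1)

def urlredux (url : String) : String :=
  if url = "" then "" else String.ofList (urlreduxLoop url.toList url.toList 0)

-- ===== PORT B =====
def urlredux_alt (url : String) : String :=
  if url = "" then "" else
    let s := url.toList
    let positions := [PySem.Chars.find s ['?'], PySem.Chars.find s ['#']].filter (fun i => i ≠ -1)
    match PySem.List.min? positions (fun i => i) with
    | none => url
    | some m => String.ofList (PySem.List.slice s none (some m))

-- ===== PRECONDITION & SPEC =====
-- Pre_ excludes only the empty string, on which Python A (and B) fall through the truthiness guard
-- and return None, which is not a value of the declared String type.
def Pre_urlredux (url : String) : Prop := url ≠ ""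
instance (url : String) : Decidable (Pre_urlredux url) := by unfold Pre_urlredux; infer_instance
def pvWitness_urlredux : String := "a?b#c"

def Spec_urlredux (url : String) (out : String) : Prop := out = urlredux_alt url
instance (url : String) (out : String) : Decidable (Spec_urlredux url out) := by unfold Spec_urlredux; infer_instance

-- ===== CLAIM (what is proved, stated in full; the proofs are below) =====
def Claim_equal_urlredux : Prop := ∀ (url : String), Dom_urlredux url → Pre_urlredux url → Spec_urlredux url (urlredux url)

-- ===== LEMMAS AND PROOFS =====

def pvOk (c : Char) : Bool := !(c == '?' || c == '#')

-- once cur.length ≤ inc, A's loop never changes cur again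
theorem urlreduxLoop_fix (cs : List Char) : ∀ (cur : List Char) (inc : Nat),
    cur.length ≤ inc → urlreduxLoop cs cur inc = cur := by
  induction cs with
  | nil => intro cur inc _; rfl
  | cons c rest ih =>
      intro cur inc h
      simp only [urlreduxLoop]
      split
      · rw [PySem.List.slice_to _ (Int.natCast_nonneg inc)]
        simp only [Int.toNat_natCast]
        rw [List.take_of_length_le h]
        exact ih cur (inc + 1) (Nat.le_succ_of_le h)
      · exact ih cur (inc + 1) (Nat.le_succ_of_le h)

theorem urlreduxLoop_main (cs : List Char) : ∀ (pre : List Char),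
    urlreduxLoop cs (pre ++ cs) pre.length = pre ++ cs.takeWhile pvOk := by
  induction cs with
  | nil => intro pre; simp [urlreduxLoop]
  | cons c rest ih =>
      intro pre
      simp only [urlreduxLoop]
      by_cases hc : c = '?' ∨ c = '#'
      · rw [if_pos hc]
        rw [PySem.List.slice_to _ (Int.natCast_nonneg pre.length)]
        simp only [Int.toNat_natCast, List.take_left]
        rw [urlreduxLoop_fix rest pre (pre.length + 1) (Nat.le_succ _)]
        have : pvOk c = false := by
          rcases hc with h | h <;> simp [pvOk, h]
        simp [List.takeWhile, this]
      · rw [if_neg hc]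
        have : pre ++ c :: rest = (pre ++ [c]) ++ rest := by simp
        rw [this]
        have hlen : pre.length + 1 = (pre ++ [c]).length := by simp
        rw [hlen, ih (pre ++ [c])]
        have : pvOk c = true := by
          rw [not_or] at hc; simp [pvOk, hc.1, hc.2]
        simp [List.takeWhile, this]

theorem urlredux_eq_takeWhile (url : String) (h : url ≠ "") :
    urlredux url = String.ofList (url.toList.takeWhile pvOk) := by
  unfold urlredux
  rw [if_neg h]
  exact congrArg _ (by simpa using urlreduxLoop_main url.toList [])

-- [c] is a prefix of l iff l starts with c
theorem single_prefix_iff (c : Char) (l : List Char) : [c] <+: l ↔ l.head? = some c := by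
  constructor
  · rintro ⟨t, rfl⟩; rfl
  · intro h
    cases l with
    | nil => simp at h
    | cons a t => simp at h; exact ⟨t, by simp [h]⟩

theorem single_infix_iff (c : Char) (l : List Char) : [c] <:+: l ↔ c ∈ l := by
  constructor
  · intro h; exact (List.singleton_sublist).1 h.sublist
  · intro h
    obtain ⟨s, t, rfl⟩ := List.append_of_mem h
    exact ⟨s, t, by simp⟩

-- find on a single char: -1 iff absent
theorem find_single_neg_one (c : Char) (s : List Char) :
    PySem.Chars.find s [c] = -1 ↔ c ∉ s := by
  rw [PySem.Chars.find_eq_neg_one_iff, single_infix_iff]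

theorem find_single_spec (c : Char) (s : List Char) (h : 0 ≤ PySem.Chars.find s [c]) :
    s[(PySem.Chars.find s [c]).toNat]? = some c ∧
      ∀ i < (PySem.Chars.find s [c]).toNat, s[i]? ≠ some c := by
  obtain ⟨h1, h2⟩ := PySem.Chars.find_spec h
  refine ⟨?_, ?_⟩
  · rw [← List.head?_drop]; exact (single_prefix_iff c _).1 h1
  · intro i hi hc
    exact h2 i hi ((single_prefix_iff c _).2 (by rw [List.head?_drop]; exact hc))

-- takeWhile = take k when all before k satisfy p and k is the length or a failure point
theorem takeWhile_eq_take (p : Char → Bool) (s : List Char) (k : Nat)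
    (h1 : ∀ i < k, ∀ c, s[i]? = some c → p c = true)
    (h2 : k = s.length ∨ ∃ c, s[k]? = some c ∧ p c = false) :
    s.takeWhile p = s.take k := by
  induction s generalizing k with
  | nil => simp
  | cons a t ih =>
      cases k with
      | zero =>
          rcases h2 with h | ⟨c, hc, hpc⟩
          · simp at h
          · simp at hc; subst hc; simp [List.takeWhile, hpc]
      | succ k =>
          have ha : p a = true := h1 0 (Nat.succ_pos k) a rfl
          simp only [List.takeWhile, ha, List.take_succ_cons]
          rw [ih k]
          · intro i hi c hc; exact h1 (i+1) (Nat.succ_lt_succ hi) c hc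
          · rcases h2 with h | ⟨c, hc, hpc⟩
            · left; simpa using h
            · right; exact ⟨c, hc, hpc⟩

-- pvOk is true exactly on non-delimiters
theorem pvOk_true_iff (c : Char) : pvOk c = true ↔ c ≠ '?' ∧ c ≠ '#' := by
  simp [pvOk]

theorem find_nonneg_of_ne (s : List Char) (c : Char)
    (h : PySem.Chars.find s [c] ≠ -1) : 0 ≤ PySem.Chars.find s [c] := by
  have := PySem.Chars.neg_one_le_find s [c]
  omega

-- the main B-side characterisation: when the cut index is k, takeWhile = take k
theorem takeWhile_of_cut (s : List Char) (k : Nat)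
    (hk : ∃ c, s[k]? = some c ∧ pvOk c = false)
    (hq : ∀ i < k, s[i]? ≠ some '?')
    (hh : ∀ i < k, s[i]? ≠ some '#') :
    s.takeWhile pvOk = s.take k := by
  apply takeWhile_eq_take
  · intro i hi c hc
    rw [pvOk_true_iff]
    exact ⟨fun h => hq i hi (h ▸ hc), fun h => hh i hi (h ▸ hc)⟩
  · exact Or.inr hk

theorem no_mem_of_find_neg (s : List Char) (c : Char)
    (h : PySem.Chars.find s [c] = -1) : ∀ (i : Nat) (d : Char), s[i]? = some d → d ≠ c := by
  intro i d hd heq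
  subst heq
  exact ((find_single_neg_one _ s).1 h) (List.mem_of_getElem? hd)

theorem urlredux_alt_eq_takeWhile (url : String) (h : url ≠ "") :
    urlredux_alt url = String.ofList (url.toList.takeWhile pvOk) := by
  unfold urlredux_alt
  rw [if_neg h]
  simp only []
  set s := url.toList with hs
  by_cases hq1 : PySem.Chars.find s ['?'] = -1 <;>
    by_cases hh1 : PySem.Chars.find s ['#'] = -1
  · -- no delimiter at all: B returns url, takeWhile keeps everything
    simp only [hq1, hh1, ne_eq, not_true_eq_false, List.filter_cons, decide_false,
      Bool.false_eq_true, if_false, List.filter_nil, PySem.List.min?]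
    have : s.takeWhile pvOk = s := by
      apply List.takeWhile_eq_self_iff.2
      intro c hc
      rw [pvOk_true_iff]
      refine ⟨?_, ?_⟩
      · rintro rfl; exact ((find_single_neg_one _ s).1 hq1) hc
      · rintro rfl; exact ((find_single_neg_one _ s).1 hh1) hc
    rw [this, hs]
    simp
  · -- only '#'
    have h0 := find_nonneg_of_ne s '#' hh1
    obtain ⟨hat, hmin⟩ := find_single_spec '#' s h0
    simp only [hq1, ne_eq, not_true_eq_false, List.filter_cons, decide_false,
      Bool.false_eq_true, if_false, decide_true, if_true, List.filter_nil,
      hh1, not_false_eq_true, PySem.List.min?_id_cons, List.foldl_nil]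
    rw [PySem.List.slice_to _ h0]
    rw [takeWhile_of_cut s (PySem.Chars.find s ['#']).toNat
      ⟨'#', hat, by simp [pvOk]⟩
      (fun i hi => fun hc => no_mem_of_find_neg s '?' hq1 i '?' hc rfl)
      (fun i hi => hmin i hi)]
  · -- only '?'
    have h0 := find_nonneg_of_ne s '?' hq1
    obtain ⟨hat, hmin⟩ := find_single_spec '?' s h0
    simp only [hh1, ne_eq, not_true_eq_false, List.filter_cons, decide_false,
      Bool.false_eq_true, if_false, decide_true, if_true, List.filter_nil,
      hq1, not_false_eq_true, PySem.List.min?_id_cons, List.foldl_nil]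
    rw [PySem.List.slice_to _ h0]
    rw [takeWhile_of_cut s (PySem.Chars.find s ['?']).toNat
      ⟨'?', hat, by simp [pvOk]⟩
      (fun i hi => hmin i hi)
      (fun i hi => fun hc => no_mem_of_find_neg s '#' hh1 i '#' hc rfl)]
  · -- both present: cut at the smaller index
    have hq0 := find_nonneg_of_ne s '?' hq1
    have hh0 := find_nonneg_of_ne s '#' hh1
    obtain ⟨hqat, hqmin⟩ := find_single_spec '?' s hq0
    obtain ⟨hhat, hhmin⟩ := find_single_spec '#' s hh0
    have hm0 : (0:Int) ≤ min (PySem.Chars.find s ['?']) (PySem.Chars.find s ['#']) :=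
      le_min hq0 hh0
    simp only [hq1, hh1, ne_eq, not_false_eq_true, List.filter_cons, decide_true,
      if_true, List.filter_nil, PySem.List.min?_id_cons, List.foldl_cons, List.foldl_nil]
    rw [PySem.List.slice_to _ hm0]
    set m := min (PySem.Chars.find s ['?']) (PySem.Chars.find s ['#']) with hm
    have hmq : m.toNat ≤ (PySem.Chars.find s ['?']).toNat := by omega
    have hmh : m.toNat ≤ (PySem.Chars.find s ['#']).toNat := by omega
    rw [takeWhile_of_cut s m.toNat ?_ ?_ ?_]
    · by_cases hle : PySem.Chars.find s ['?'] ≤ PySem.Chars.find s ['#']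
      · exact ⟨'?', by rw [show m.toNat = (PySem.Chars.find s ['?']).toNat by omega]; exact hqat,
          by simp [pvOk]⟩
      · exact ⟨'#', by rw [show m.toNat = (PySem.Chars.find s ['#']).toNat by omega]; exact hhat,
          by simp [pvOk]⟩
    · intro i hi; exact hqmin i (lt_of_lt_of_le hi hmq)
    · intro i hi; exact hhmin i (lt_of_lt_of_le hi hmh)

-- ===== VERDICT (by name: the statement is the Claim_ definition above) =====
theorem urlredux_spec : Claim_equal_urlredux := by
  intro url _ hpre
  unfold Spec_urlredux
  rw [urlredux_eq_takeWhile url hpre, urlredux_alt_eq_takeWhile url hpre]
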